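-- pv_equiv track=rewrite | github.com/thuphan102/project-food-demand-forecast | demand_forecast_app.py | meal_id
-- ===== SOURCE A (Python) =====
-- def meal_id(datacol):
--     meal_id_val_index_n = []
--     for i in datacol:
--         if i >= 1000 and i <= 1300:
--             meal_id_val_index_n.append("1000-1300")
--         elif i >= 1301 and i <=1600:
--             meal_id_val_index_n.append("1301-1600")
--         elif i >= 1601 and i <=1900:
--             meal_id_val_index_n.append("1601-1900")
--         elif i >= 1901 and i <=2200:
--             meal_id_val_index_n.append("1901-2200")
--         elif i >= 2201 and i <=2500:
--             meal_id_val_index_n.append("2201-2500")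
--         elif i >= 2501 and i <=2800:
--             meal_id_val_index_n.append("2501-2800")
--         else:
--             meal_id_val_index_n.append("2801-3000")
--     return  meal_id_val_index_n
-- ===== SOURCE B (Python) =====
-- LABELS = ["1000-1300", "1301-1600", "1601-1900", "1901-2200",
--           "2201-2500", "2501-2800"]
--
--
-- def meal_id(datacol):
--     # closed-form bucket index instead of a branch chain:
--     # for 1000 <= i <= 2800 the bucket is max(0, (i - 1001) // 300)
--     return [LABELS[max(0, (i - 1001) // 300)] if 1000 <= i <= 2800
--             else "2801-3000"
--             for i in datacol]
-- ===== Notes on version B (the rewrite author's own statement) =====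
-- stated objective: simpler
-- what changed: Replaces the six-way if/elif comparison chain with a closed-form arithmetic bucket index max(0,(i-1001)//300) into a label table, inside a single list comprehension.
import Mathlib
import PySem

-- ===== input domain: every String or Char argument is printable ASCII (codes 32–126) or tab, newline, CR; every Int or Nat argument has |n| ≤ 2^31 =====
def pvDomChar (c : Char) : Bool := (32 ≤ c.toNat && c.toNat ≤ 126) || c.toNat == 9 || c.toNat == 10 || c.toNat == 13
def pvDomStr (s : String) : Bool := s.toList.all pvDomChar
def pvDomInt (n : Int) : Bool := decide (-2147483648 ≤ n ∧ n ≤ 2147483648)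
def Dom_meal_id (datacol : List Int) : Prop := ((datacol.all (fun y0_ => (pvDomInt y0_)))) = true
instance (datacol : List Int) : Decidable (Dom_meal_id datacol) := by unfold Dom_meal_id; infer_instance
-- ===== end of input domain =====

-- B replaces A's six-way if/elif chain by a closed-form arithmetic bucket index into a
-- label table (objective: simpler).

-- ===== PORT A =====
def meal_id (datacol : List Int) : List String :=
  datacol.foldl (fun acc i =>
    if 1000 ≤ i ∧ i ≤ 1300 then acc ++ ["1000-1300"]
    else if 1301 ≤ i ∧ i ≤ 1600 then acc ++ ["1301-1600"]
    else if 1601 ≤ i ∧ i ≤ 1900 then acc ++ ["1601-1900"]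
    else if 1901 ≤ i ∧ i ≤ 2200 then acc ++ ["1901-2200"]
    else if 2201 ≤ i ∧ i ≤ 2500 then acc ++ ["2201-2500"]
    else if 2501 ≤ i ∧ i ≤ 2800 then acc ++ ["2501-2800"]
    else acc ++ ["2801-3000"]) []

-- ===== PORT B =====
def pvLabels : List String :=
  ["1000-1300", "1301-1600", "1601-1900", "1901-2200", "2201-2500", "2501-2800"]

-- LABELS[max(0,(i-1001)//300)]; the index is always in range under the guard,
-- so the .getD "" default (Python's IndexError) is unreachable
def pvBucket (i : Int) : String :=
  if 1000 ≤ i ∧ i ≤ 2800 then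
    (PySem.List.pyGet? pvLabels (max 0 (PySem.Int.floordiv (i - 1001) 300))).getD ""
  else "2801-3000"

def meal_id_alt (datacol : List Int) : List String :=
  datacol.map pvBucket

-- ===== PRECONDITION & SPEC =====
def Spec_meal_id (datacol : List Int) (out : List String) : Prop := out = meal_id_alt datacol
instance (datacol : List Int) (out : List String) : Decidable (Spec_meal_id datacol out) := by unfold Spec_meal_id; infer_instance

-- ===== CLAIM (what is proved, stated in full; the proofs are below) =====
def Claim_equal_meal_id : Prop := ∀ (datacol : List Int), Dom_meal_id datacol → Spec_meal_id datacol (meal_id datacol)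

-- ===== LEMMAS AND PROOFS =====

-- A's per-element branch chain, named for the proof
def pvChainA (i : Int) : String :=
  if 1000 ≤ i ∧ i ≤ 1300 then "1000-1300"
  else if 1301 ≤ i ∧ i ≤ 1600 then "1301-1600"
  else if 1601 ≤ i ∧ i ≤ 1900 then "1601-1900"
  else if 1901 ≤ i ∧ i ≤ 2200 then "1901-2200"
  else if 2201 ≤ i ∧ i ≤ 2500 then "2201-2500"
  else if 2501 ≤ i ∧ i ≤ 2800 then "2501-2800"
  else "2801-3000"

theorem meal_id_eq_map (datacol : List Int) : meal_id datacol = datacol.map pvChainA := by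
  unfold meal_id
  have hfun : (fun (acc : List String) (i : Int) =>
      if 1000 ≤ i ∧ i ≤ 1300 then acc ++ ["1000-1300"]
      else if 1301 ≤ i ∧ i ≤ 1600 then acc ++ ["1301-1600"]
      else if 1601 ≤ i ∧ i ≤ 1900 then acc ++ ["1601-1900"]
      else if 1901 ≤ i ∧ i ≤ 2200 then acc ++ ["1901-2200"]
      else if 2201 ≤ i ∧ i ≤ 2500 then acc ++ ["2201-2500"]
      else if 2501 ≤ i ∧ i ≤ 2800 then acc ++ ["2501-2800"]
      else acc ++ ["2801-3000"]) =
      (fun acc i => acc ++ [pvChainA i]) := by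
    funext acc i
    unfold pvChainA
    split_ifs <;> rfl
  rw [hfun, PySem.List.foldl_append_singleton_eq_map]
  simp

theorem pvChainA_eq_pvBucket (i : Int) : pvChainA i = pvBucket i := by
  unfold pvChainA pvBucket
  by_cases h : 1000 ≤ i ∧ i ≤ 2800
  · rw [if_pos h, PySem.Int.floordiv_eq_ediv_of_pos (by norm_num)]
    by_cases h1 : i ≤ 1300
    · rw [show max 0 ((i - 1001) / 300) = 0 by omega]
      split_ifs <;> first | decide | omega
    · by_cases h2 : i ≤ 1600
      · rw [show max 0 ((i - 1001) / 300) = 1 by omega]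
        split_ifs <;> first | decide | omega
      · by_cases h3 : i ≤ 1900
        · rw [show max 0 ((i - 1001) / 300) = 2 by omega]
          split_ifs <;> first | decide | omega
        · by_cases h4 : i ≤ 2200
          · rw [show max 0 ((i - 1001) / 300) = 3 by omega]
            split_ifs <;> first | decide | omega
          · by_cases h5 : i ≤ 2500
            · rw [show max 0 ((i - 1001) / 300) = 4 by omega]
              split_ifs <;> first | decide | omega
            · rw [show max 0 ((i - 1001) / 300) = 5 by omega]
              split_ifs <;> first | decide | omega
  · rw [if_neg h]
    split_ifs <;> first | rfl | omega

-- ===== VERDICT (by name: the statement is the Claim_ definition above) =====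
theorem meal_id_spec : Claim_equal_meal_id := by
  intro datacol _
  unfold Spec_meal_id meal_id_alt
  rw [meal_id_eq_map, funext pvChainA_eq_pvBucket]
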